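-- pv_equiv track=rewrite | github.com/AlexChernyshenko/GeneratingRandomness | predictor/predictor.py | triad_follow_count
-- ===== SOURCE A (Python) =====
-- def triad_follow_count(binary_str):
--     counts = {'000': [0, 0], '001': [0, 0], '010': [0, 0], '011': [0, 0],
--               '100': [0, 0], '101': [0, 0], '110': [0, 0], '111': [0, 0]}
--
--     for i in range(len(binary_str) - 3):
--         triad = binary_str[i:i + 3]
--         next_char = binary_str[i + 3]
--         if next_char == '0':
--             counts[triad][0] += 1
--         else:
--             counts[triad][1] += 1
--     return counts
-- ===== SOURCE B (Python) =====
-- def triad_follow_count(binary_str):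
--     triads = ('000', '001', '010', '011', '100', '101', '110', '111')
--     windows = [binary_str[i:i + 4] for i in range(len(binary_str) - 3)]
--     return {t: [sum(1 for w in windows if w[:3] == t and w[3] == '0'),
--                 sum(1 for w in windows if w[:3] == t and w[3] != '0')]
--             for t in triads}
-- ===== Notes on version B (the rewrite author's own statement) =====
-- stated objective: alternative
-- what changed: B materialises the list of 4-character windows once and builds each dict entry by a closed per-key count over that list (windows whose fourth character is zero vs nonzero), instead of A's sequential in-place dict mutation per position.
import Mathlib
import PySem

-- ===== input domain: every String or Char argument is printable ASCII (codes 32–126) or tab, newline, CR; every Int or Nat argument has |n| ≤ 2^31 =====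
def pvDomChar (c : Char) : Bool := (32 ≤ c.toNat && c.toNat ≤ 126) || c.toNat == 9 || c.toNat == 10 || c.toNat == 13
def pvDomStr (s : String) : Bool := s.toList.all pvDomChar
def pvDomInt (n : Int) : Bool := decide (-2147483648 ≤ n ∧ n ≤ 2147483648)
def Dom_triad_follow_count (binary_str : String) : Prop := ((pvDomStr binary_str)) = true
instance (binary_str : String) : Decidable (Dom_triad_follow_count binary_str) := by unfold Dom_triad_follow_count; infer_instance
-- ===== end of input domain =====

-- B replaces A's sequential per-position dict mutation by one window list plus a closed per-key count (alternative decomposition, same cost).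
set_option maxRecDepth 16000


-- ===== PORT A =====
def tfcInit : PySem.Dict String (List Int) :=
  PySem.Dict.ofList [("000", [0, 0]), ("001", [0, 0]), ("010", [0, 0]), ("011", [0, 0]),
                     ("100", [0, 0]), ("101", [0, 0]), ("110", [0, 0]), ("111", [0, 0])]

-- counts[triad][0] += 1 : in-place increment of the list's first cell (exact for the length-2 lists the code holds)
def tfcBump0 : List Int → List Int
  | a :: r => (a + 1) :: r
  | [] => []

-- counts[triad][1] += 1
def tfcBump1 : List Int → List Int
  | a :: b :: r => a :: (b + 1) :: r
  | l => l

-- one iteration of A's loop body (modify is a no-op default path outside Pre_, where Python raises KeyError)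
def tfcStep (cs : List Char) (counts : PySem.Dict String (List Int)) (i : Int) :
    PySem.Dict String (List Int) :=
  let triad := String.ofList (PySem.List.slice cs (some i) (some (i + 3)))
  let next_char := PySem.List.pyGetD cs (i + 3) ' '   -- in range for every loop index under Pre_
  if next_char = '0' then counts.modify triad [0, 0] tfcBump0
  else counts.modify triad [0, 0] tfcBump1

def triad_follow_count (binary_str : String) : List (String × List Int) :=
  let cs := binary_str.toList
  ((PySem.List.pyRange 0 ((cs.length : Int) - 3) 1).foldl (tfcStep cs) tfcInit).items

-- ===== PORT B =====
def tfcKeys : List String := ["000", "001", "010", "011", "100", "101", "110", "111"]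

def tfcWindows (cs : List Char) (m : Int) : List (List Char) :=
  (PySem.List.pyRange 0 m 1).map (fun i => PySem.List.slice cs (some i) (some (i + 4)))

-- w[:3] == t and w[3] == '0'
def tfcP0 (t : String) (w : List Char) : Bool :=
  decide (PySem.List.slice w none (some 3) = t.toList) && (PySem.List.pyGetD w 3 ' ' == '0')

-- w[:3] == t and w[3] != '0'
def tfcP1 (t : String) (w : List Char) : Bool :=
  decide (PySem.List.slice w none (some 3) = t.toList) && !(PySem.List.pyGetD w 3 ' ' == '0')

def triad_follow_count_alt (binary_str : String) : List (String × List Int) :=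
  let cs := binary_str.toList
  let windows := tfcWindows cs ((cs.length : Int) - 3)
  tfcKeys.map (fun t =>
    (t, [((windows.countP (tfcP0 t) : Nat) : Int), ((windows.countP (tfcP1 t) : Nat) : Int)]))

-- ===== PRECONDITION & SPEC =====
-- Pre_ excludes exactly the inputs on which A raises KeyError: length at least 4 with a
-- non-binary character at some position before the last one (each such position is in a triad).
def Pre_triad_follow_count (binary_str : String) : Prop :=
  binary_str.toList.length < 4 ∨ ∀ c ∈ binary_str.toList.dropLast, c = '0' ∨ c = '1'
instance (binary_str : String) : Decidable (Pre_triad_follow_count binary_str) := by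
  unfold Pre_triad_follow_count; infer_instance

def pvWitness_triad_follow_count : String := "01"

def Spec_triad_follow_count (binary_str : String) (out : List (String × List Int)) : Prop :=
  out = triad_follow_count_alt binary_str
instance (binary_str : String) (out : List (String × List Int)) :
    Decidable (Spec_triad_follow_count binary_str out) := by
  unfold Spec_triad_follow_count; infer_instance

-- ===== CLAIM (what is proved, stated in full; the proofs are below) =====
def Claim_equal_triad_follow_count : Prop := ∀ (binary_str : String),
  Dom_triad_follow_count binary_str → Pre_triad_follow_count binary_str →
  Spec_triad_follow_count binary_str (triad_follow_count binary_str)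

-- ===== LEMMAS AND PROOFS =====

-- modify of a key present in a mapped-literal dict rewrites exactly that entry in place
lemma tfc_modify_mk_map (ks : List String) (hnd : ks.Nodup) (f : String → List Int)
    (T : String) (hT : T ∈ ks) (d0 : List Int) (g : List Int → List Int) :
    (PySem.Dict.mk (ks.map (fun t => (t, f t)))).modify T d0 g
      = PySem.Dict.mk (ks.map (fun t => (t, if t = T then g (f t) else f t))) := by
  have hkeys : (PySem.Dict.mk (ks.map (fun t => (t, f t)))).keys = ks := by
    simp [PySem.Dict.keys, Function.comp_def]
  have hcont : (PySem.Dict.mk (ks.map (fun t => (t, f t)))).contains T = true := by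
    rw [PySem.Dict.contains_iff_mem_keys, hkeys]; exact hT
  have hget : (PySem.Dict.mk (ks.map (fun t => (t, f t)))).getD T d0 = f T := by
    refine PySem.Dict.getD_of_mem_items _ ?_ (by rw [hkeys]; exact hnd) d0
    exact List.mem_map_of_mem hT
  show ((PySem.Dict.mk (ks.map (fun t => (t, f t)))).insert T
      (g ((PySem.Dict.mk (ks.map (fun t => (t, f t)))).getD T d0))) = _
  rw [hget]
  apply PySem.Dict.ext
  rw [PySem.Dict.items_insert_of_contains _ _ hcont]
  show (ks.map (fun t => (t, f t))).map _ = _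
  rw [List.map_map]
  apply List.map_congr_left
  intro t _
  by_cases h : t = T
  · subst h; simp
  · simp [h]

-- one loop iteration on the invariant dict: the new window bumps exactly its triad's cell
lemma tfc_step_eq (cs : List Char) (hpre : ∀ c ∈ cs.dropLast, c = '0' ∨ c = '1')
    (k : Nat) (hk : k + 4 ≤ cs.length) (f0 f1 : String → Int) :
    tfcStep cs (PySem.Dict.mk (tfcKeys.map (fun t => (t, [f0 t, f1 t])))) (k : Int)
      = PySem.Dict.mk (tfcKeys.map (fun t =>
          (t, [f0 t + (if tfcP0 t (PySem.List.slice cs (some (k : Int)) (some ((k : Int) + 4))) then 1 else 0),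
               f1 t + (if tfcP1 t (PySem.List.slice cs (some (k : Int)) (some ((k : Int) + 4))) then 1 else 0)]))) := by
  have h0 : k < cs.length := by omega
  have h1 : k + 1 < cs.length := by omega
  have h2 : k + 2 < cs.length := by omega
  have h3 : k + 3 < cs.length := by omega
  have hdrop : cs.drop k = cs[k] :: cs[k+1] :: cs[k+2] :: cs[k+3] :: cs.drop (k+3+1) := by
    rw [List.drop_eq_getElem_cons h0, List.drop_eq_getElem_cons h1,
        List.drop_eq_getElem_cons h2, List.drop_eq_getElem_cons h3]
  have hw : PySem.List.slice cs (some (k : Int)) (some ((k : Int) + 4))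
      = [cs[k], cs[k+1], cs[k+2], cs[k+3]] := by
    rw [show ((k : Int) + 4) = ((k + 4 : Nat) : Int) by push_cast; ring,
        PySem.List.slice_natCast, show k + 4 - k = 4 by omega, hdrop]
    rfl
  have htriad : PySem.List.slice cs (some (k : Int)) (some ((k : Int) + 3))
      = [cs[k], cs[k+1], cs[k+2]] := by
    rw [show ((k : Int) + 3) = ((k + 3 : Nat) : Int) by push_cast; ring,
        PySem.List.slice_natCast, show k + 3 - k = 3 by omega, hdrop]
    rfl
  have hnext : PySem.List.pyGetD cs ((k : Int) + 3) ' ' = cs[k+3] := by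
    rw [show ((k : Int) + 3) = ((k + 3 : Nat) : Int) by push_cast; ring,
        PySem.List.pyGetD_natCast]
    exact List.getD_eq_getElem cs ' ' h3
  have hbin : ∀ j : Nat, (hj : k + j < cs.length - 1) → cs[k+j]'(by omega) = '0' ∨ cs[k+j]'(by omega) = '1' := by
    intro j hj
    have hlen : k + j < cs.dropLast.length := by
      rw [List.length_dropLast]; omega
    have := hpre (cs.dropLast[k+j]'hlen) (List.getElem_mem hlen)
    rwa [List.getElem_dropLast] at this
  have ha := hbin 0 (by omega)
  have hb := hbin 1 (by omega)
  have hc := hbin 2 (by omega)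
  simp only [Nat.add_zero] at ha
  unfold tfcStep
  rw [htriad, hnext, hw]
  have hnd : tfcKeys.Nodup := by decide
  have hTmem : String.ofList [cs[k], cs[k+1], cs[k+2]] ∈ tfcKeys := by
    rcases ha with h|h <;> rcases hb with h'|h' <;> rcases hc with h''|h'' <;>
      rw [h, h', h''] <;> decide
  have hslice3 : PySem.List.slice ([cs[k], cs[k+1], cs[k+2], cs[k+3]] : List Char) none (some 3)
      = [cs[k], cs[k+1], cs[k+2]] := by
    rw [PySem.List.slice_to _ (by norm_num)]
    rfl
  have hkey : ∀ t : String,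
      (PySem.List.slice ([cs[k], cs[k+1], cs[k+2], cs[k+3]] : List Char) none (some 3) = t.toList)
        ↔ t = String.ofList [cs[k], cs[k+1], cs[k+2]] := by
    intro t
    rw [hslice3, ← String.toList_inj, String.toList_ofList, eq_comm]
  have hget3 : PySem.List.pyGetD ([cs[k], cs[k+1], cs[k+2], cs[k+3]] : List Char) 3 ' ' = cs[k+3] := by
    rw [PySem.List.pyGetD_ofNat']
    rfl
  by_cases hn : cs[k+3] = '0'
  · rw [hn] at hslice3 hget3 ⊢
    rw [if_pos rfl, tfc_modify_mk_map tfcKeys hnd _ _ hTmem]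
    apply PySem.Dict.ext
    show List.map _ _ = List.map _ _
    apply List.map_congr_left
    intro t _
    by_cases hteq : t = String.ofList [cs[k], cs[k+1], cs[k+2]]
    · subst hteq
      simp [tfcP0, tfcP1, hslice3, hget3, tfcBump0, String.toList_ofList]
    · have hne : ¬(([cs[k], cs[k+1], cs[k+2]] : List Char) = t.toList) := by
        intro hcontra
        exact hteq (by rw [← String.toList_inj, String.toList_ofList]; exact hcontra.symm)
      simp [tfcP0, tfcP1, hslice3, hne, hteq]
  · rw [if_neg hn, tfc_modify_mk_map tfcKeys hnd _ _ hTmem]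
    apply PySem.Dict.ext
    show List.map _ _ = List.map _ _
    apply List.map_congr_left
    intro t _
    by_cases hteq : t = String.ofList [cs[k], cs[k+1], cs[k+2]]
    · subst hteq
      simp [tfcP0, tfcP1, hslice3, hget3, hn, tfcBump1, String.toList_ofList]
    · have hne : ¬(([cs[k], cs[k+1], cs[k+2]] : List Char) = t.toList) := by
        intro hcontra
        exact hteq (by rw [← String.toList_inj, String.toList_ofList]; exact hcontra.symm)
      simp [tfcP0, tfcP1, hslice3, hne, hteq]

-- the loop invariant: after k iterations A's dict is B's per-key count table over the first k windows
lemma tfc_loop (cs : List Char) (hpre : ∀ c ∈ cs.dropLast, c = '0' ∨ c = '1')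
    (k : Nat) (hk : k + 3 ≤ cs.length) :
    (PySem.List.pyRange 0 (k : Int) 1).foldl (tfcStep cs) tfcInit
      = PySem.Dict.mk (tfcKeys.map (fun t =>
          (t, [(((tfcWindows cs (k : Int)).countP (tfcP0 t) : Nat) : Int),
               (((tfcWindows cs (k : Int)).countP (tfcP1 t) : Nat) : Int)]))) := by
  induction k with
  | zero =>
    rw [show ((0 : Nat) : Int) = 0 from rfl, PySem.List.pyRange_one_eq_nil le_rfl]
    rfl
  | succ k ih =>
    have hcast : ((k + 1 : Nat) : Int) = (k : Int) + 1 := by push_cast; ring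
    have hWk : tfcWindows cs ((k : Int) + 1)
        = tfcWindows cs (k : Int) ++ [PySem.List.slice cs (some (k : Int)) (some ((k : Int) + 4))] := by
      unfold tfcWindows
      rw [PySem.List.pyRange_one_succ_right (by positivity), List.map_append]
      rfl
    rw [hcast, PySem.List.pyRange_one_succ_right (by positivity), List.foldl_append,
        ih (by omega), List.foldl_cons, List.foldl_nil,
        tfc_step_eq cs hpre k (by omega), hWk]
    congr 1
    apply List.map_congr_left
    intro t _
    simp only [List.countP_append, List.countP_cons, List.countP_nil, Nat.zero_add]
    push_cast
    ring_nf

-- ===== VERDICT (by name: the statement is the Claim_ definition above) =====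
theorem triad_follow_count_spec : Claim_equal_triad_follow_count := by
  intro s _ hpre
  show (List.foldl (tfcStep s.toList) tfcInit
          (PySem.List.pyRange 0 ((s.toList.length : Int) - 3) 1)).items
      = List.map (fun t =>
          (t, [((List.countP (tfcP0 t) (tfcWindows s.toList ((s.toList.length : Int) - 3)) : Nat) : Int),
               ((List.countP (tfcP1 t) (tfcWindows s.toList ((s.toList.length : Int) - 3)) : Nat) : Int)])) tfcKeys
  by_cases h : s.toList.length ≤ 3
  · have hneg : ((s.toList.length : Int) - 3) ≤ 0 := by omega
    unfold tfcWindows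
    rw [PySem.List.pyRange_one_eq_nil hneg]
    rfl
  · have hbinary : ∀ c ∈ s.toList.dropLast, c = '0' ∨ c = '1' :=
      hpre.resolve_left (by omega)
    have hc : ((s.toList.length : Int) - 3) = ((s.toList.length - 3 : Nat) : Int) := by omega
    rw [hc, tfc_loop s.toList hbinary (s.toList.length - 3) (by omega)]
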